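-- pv_equiv track=rewrite | github.com/hakank/hakank | google_or_tools/nonogram_automaton_sat.py | make_transition_automaton
-- ===== SOURCE A (Python) =====
-- def make_transition_automaton(pattern):
--   """
--   Make a transition (automaton) matrix from a
--   single pattern, e.g. [3,2,1]
--   """
--   t = []
--   c = 0
--   for i in range(len(pattern)):
--     t.append((c,0,c))  # 0*
--     for _j in range(pattern[i]):
--       t.append((c,1,c+1)) # 1{pattern[i]}
--       c += 1
--
--     t.append((c,0,c+1)) # 0+
--     c+=1
--
--   t.append((c,0,c)) # 0*
--
--   return t, c
-- ===== SOURCE B (Python) =====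
-- def make_transition_automaton(pattern):
--     """Divide-and-conquer construction: build the automata of the two halves of
--     the pattern, threading the start state through, and concatenate them."""
--     def build(c, blocks):
--         if len(blocks) == 1:
--             p = blocks[0]
--             run = [(c + k, 1, c + k + 1) for k in range(p)]
--             e = c + len(run)
--             return [(c, 0, c)] + run + [(e, 0, e + 1)], e + 1
--         mid = len(blocks) // 2
--         left, c = build(c, blocks[:mid])
--         right, c = build(c, blocks[mid:])
--         left.extend(right)
--         return left, c
--     if not pattern:
--         return [(0, 0, 0)], 0
--     t, c = build(0, pattern)
--     return t + [(c, 0, c)], c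
-- ===== Notes on version B (the rewrite author's own statement) =====
-- stated objective: alternative
-- what changed: B replaces A's iterative nested loop with a mutable state counter by a divide-and-conquer recursion on the block list: build the automaton of each half of the pattern, threading the start state through, and concatenate the halves; each single block is emitted as a comprehension-built run.
import Mathlib
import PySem

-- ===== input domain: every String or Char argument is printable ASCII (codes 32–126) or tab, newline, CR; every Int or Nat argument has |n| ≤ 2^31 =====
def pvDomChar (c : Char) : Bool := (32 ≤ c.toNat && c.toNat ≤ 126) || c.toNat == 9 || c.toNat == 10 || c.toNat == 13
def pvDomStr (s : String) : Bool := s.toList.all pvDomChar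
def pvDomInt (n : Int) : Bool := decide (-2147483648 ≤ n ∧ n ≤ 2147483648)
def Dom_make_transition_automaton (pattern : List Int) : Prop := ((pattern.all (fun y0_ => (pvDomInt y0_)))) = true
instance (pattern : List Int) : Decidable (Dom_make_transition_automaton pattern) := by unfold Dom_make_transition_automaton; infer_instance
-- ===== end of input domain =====

-- B builds the automaton by divide and conquer on the block list — build each half,
-- threading the start state through, and concatenate — instead of A's iterative
-- nested loop with a mutable state counter (objective: alternative).

-- ===== PORT A =====
-- per-index body of A's outer loop: append (c,0,c), run the inner 1-run loop, append (c,0,c+1)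
def pvStepA (acc : List (Int × Int × Int) × Int) (p : Int) : List (Int × Int × Int) × Int :=
  let t1 := acc.1 ++ [(acc.2, 0, acc.2)]
  let inner := (PySem.List.pyRange 0 p 1).foldl
    (fun (b : List (Int × Int × Int) × Int) _ => (b.1 ++ [(b.2, 1, b.2 + 1)], b.2 + 1))
    (t1, acc.2)
  (inner.1 ++ [(inner.2, 0, inner.2 + 1)], inner.2 + 1)

def make_transition_automaton (pattern : List Int) : (List (Int × Int × Int)) × Int :=
  -- for i in range(len(pattern)): … pattern[i] …
  let r := (PySem.List.pyRange 0 (PySem.List.len pattern) 1).foldl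
    (fun acc i => pvStepA acc (PySem.List.pyGetD pattern i 0)) ([], 0)
  (r.1 ++ [(r.2, 0, r.2)], r.2)

-- ===== PORT B =====
-- build(c, blocks); the [] case is unreachable from the entry (Python's build is
-- never called on an empty list), so its value is irrelevant to the claim
def pvBuild : Int → List Int → (List (Int × Int × Int)) × Int
  | c, [] => ([], c)
  | c, [p] =>
      let run := (PySem.List.pyRange 0 p 1).map (fun k => (c + k, 1, c + k + 1))
      let e : Int := c + run.length
      ([(c, 0, c)] ++ run ++ [(e, 0, e + 1)], e + 1)
  | c, q :: r :: rest =>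
      let mid := (q :: r :: rest).length / 2
      let left := pvBuild c ((q :: r :: rest).take mid)
      let right := pvBuild left.2 ((q :: r :: rest).drop mid)
      (left.1 ++ right.1, right.2)
  termination_by _ blocks => blocks.length
  decreasing_by
    · simp [List.length_take]; omega
    · simp [List.length_drop]; omega

def make_transition_automaton_alt (pattern : List Int) : (List (Int × Int × Int)) × Int :=
  match pattern with
  | [] => ([(0, 0, 0)], 0)
  | _ =>
      let tc := pvBuild 0 pattern
      (tc.1 ++ [(tc.2, 0, tc.2)], tc.2)

-- ===== PRECONDITION & SPEC =====
def Spec_make_transition_automaton (pattern : List Int) (out : (List (Int × Int × Int)) × Int) : Prop := out = make_transition_automaton_alt pattern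
instance (pattern : List Int) (out : (List (Int × Int × Int)) × Int) : Decidable (Spec_make_transition_automaton pattern out) := by unfold Spec_make_transition_automaton; infer_instance

-- ===== CLAIM (what is proved, stated in full; the proofs are below) =====
def Claim_equal_make_transition_automaton : Prop := ∀ (pattern : List Int), Dom_make_transition_automaton pattern → Spec_make_transition_automaton pattern (make_transition_automaton pattern)

-- ===== LEMMAS AND PROOFS =====

-- canonical block list both programs produce, from running counter c
def pvBlocks : Int → List Int → List (Int × Int × Int)
  | _, [] => []
  | c, p :: ps =>
      [(c, 0, c)] ++ ((PySem.List.pyRange 0 p 1).map (fun k => (c + k, 1, c + k + 1)))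
        ++ [(c + max p 0, 0, c + max p 0 + 1)] ++ pvBlocks (c + max p 0 + 1) ps

def pvTot : Int → List Int → Int
  | c, [] => c
  | c, p :: ps => pvTot (c + max p 0 + 1) ps

-- ---- A-side: A's fold produces pvBlocks ----
lemma pvInnerGen (l : List Int) : ∀ (t : List (Int × Int × Int)) (c : Int),
    l.foldl (fun (b : List (Int × Int × Int) × Int) _ => (b.1 ++ [(b.2, 1, b.2 + 1)], b.2 + 1)) (t, c)
    = (t ++ (List.range l.length).map (fun k : ℕ => ((c + (k : Int), 1, c + (k : Int) + 1) : Int × Int × Int)), c + l.length) := by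
  induction l with
  | nil => intro t c; simp
  | cons a l ih =>
      intro t c
      simp only [List.foldl_cons, List.length_cons]
      rw [ih (t ++ [(c, 1, c + 1)]) (c + 1)]
      rw [List.range_succ_eq_map, List.map_cons, List.map_map]
      rw [Prod.mk.injEq]
      refine ⟨?_, by push_cast; ring⟩
      simp only [List.append_assoc, List.cons_append, List.nil_append, Nat.cast_zero]
      congr 2
      · norm_num
      apply List.map_congr_left; intro k _
      simp only [Function.comp, Nat.succ_eq_add_one]
      push_cast
      exact Prod.ext (by ring) (Prod.ext rfl (by ring))

lemma pvInner (p : Int) (t : List (Int × Int × Int)) (c : Int) :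
    (PySem.List.pyRange 0 p 1).foldl
      (fun (b : List (Int × Int × Int) × Int) _ => (b.1 ++ [(b.2, 1, b.2 + 1)], b.2 + 1)) (t, c)
    = (t ++ (PySem.List.pyRange 0 p 1).map (fun k => (c + k, 1, c + k + 1)), c + max p 0) := by
  rw [pvInnerGen, PySem.List.length_pyRange_one, PySem.List.pyRange_one, List.map_map]
  rw [Prod.mk.injEq]
  refine ⟨?_, by omega⟩
  congr 1
  apply List.map_congr_left; intro k _
  simp only [Function.comp]; norm_num

lemma pvFoldA (ps : List Int) : ∀ (t : List (Int × Int × Int)) (c : Int),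
    ps.foldl pvStepA (t, c) = (t ++ pvBlocks c ps, pvTot c ps) := by
  induction ps with
  | nil => intro t c; simp [pvBlocks, pvTot]
  | cons p ps ih =>
      intro t c
      simp only [List.foldl_cons]
      have hstep : pvStepA (t, c) p
          = (t ++ [(c, 0, c)] ++ ((PySem.List.pyRange 0 p 1).map (fun k => (c + k, 1, c + k + 1)))
              ++ [(c + max p 0, 0, c + max p 0 + 1)], c + max p 0 + 1) := by
        simp only [pvStepA, pvInner]
      rw [hstep, ih]
      simp [pvBlocks, pvTot, List.append_assoc]

-- ---- B-side: the divide-and-conquer produces pvBlocks with the threaded counter ----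
lemma pvTot_append (l1 l2 : List Int) : ∀ c : Int,
    pvTot c (l1 ++ l2) = pvTot (pvTot c l1) l2 := by
  induction l1 with
  | nil => intro c; simp [pvTot]
  | cons p l1 ih => intro c; simp [pvTot, ih]

lemma pvBlocks_append (l1 l2 : List Int) : ∀ c : Int,
    pvBlocks c (l1 ++ l2) = pvBlocks c l1 ++ pvBlocks (pvTot c l1) l2 := by
  induction l1 with
  | nil => intro c; simp [pvBlocks, pvTot]
  | cons p l1 ih =>
      intro c
      simp [pvBlocks, pvTot, ih, List.append_assoc]

lemma pvRunLen (c p : Int) :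
    c + (((PySem.List.pyRange 0 p 1).map (fun k : Int => ((c + k, 1, c + k + 1) : Int × Int × Int))).length : Int)
      = c + max p 0 := by
  rw [List.length_map, PySem.List.length_pyRange_one]
  omega

lemma pvBuildEq (n : Nat) : ∀ (blocks : List Int), blocks.length ≤ n → blocks ≠ [] → ∀ c : Int,
    pvBuild c blocks = (pvBlocks c blocks, pvTot c blocks) := by
  induction n with
  | zero =>
      intro blocks h hne
      cases blocks with
      | nil => exact absurd rfl hne
      | cons q r => simp at h
  | succ n ih =>
      intro blocks h hne c
      match blocks, hne with
      | [p], _ =>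
          simp only [pvBuild, pvRunLen]
          simp [pvBlocks, pvTot]
      | q :: r :: rest, _ =>
          have hl : (q :: r :: rest).length = rest.length + 2 := by simp
          have hmid1 : 1 ≤ (q :: r :: rest).length / 2 := by omega
          have hmid2 : (q :: r :: rest).length / 2 < (q :: r :: rest).length := by omega
          have htl : ((q :: r :: rest).take ((q :: r :: rest).length / 2)).length
              = (q :: r :: rest).length / 2 := by
            rw [List.length_take]; omega
          have hdl : ((q :: r :: rest).drop ((q :: r :: rest).length / 2)).length
              = (q :: r :: rest).length - (q :: r :: rest).length / 2 := List.length_drop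
          have htne : (q :: r :: rest).take ((q :: r :: rest).length / 2) ≠ [] := by
            intro hnil
            rw [hnil] at htl
            simp at htl
            omega
          have hdne : (q :: r :: rest).drop ((q :: r :: rest).length / 2) ≠ [] := by
            intro hnil
            rw [hnil] at hdl
            simp at hdl
            omega
          have h1 := ih ((q :: r :: rest).take ((q :: r :: rest).length / 2))
            (by rw [htl]; omega) htne c
          have h2 := ih ((q :: r :: rest).drop ((q :: r :: rest).length / 2))
            (by rw [hdl]; omega) hdne
            (pvTot c ((q :: r :: rest).take ((q :: r :: rest).length / 2)))
          rw [pvBuild, h1, h2]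
          rw [← pvBlocks_append, ← pvTot_append, List.take_append_drop]

-- ===== VERDICT (by name: the statement is the Claim_ definition above) =====
theorem make_transition_automaton_spec : Claim_equal_make_transition_automaton := by
  intro pattern _
  unfold Spec_make_transition_automaton
  simp only [make_transition_automaton]
  rw [PySem.List.foldl_pyRange_zero_pyGetD pattern 0 pvStepA ([], 0)]
  rw [pvFoldA pattern [] 0]
  cases pattern with
  | nil => simp [make_transition_automaton_alt, pvBlocks, pvTot]
  | cons q rest =>
      simp only [make_transition_automaton_alt]
      rw [pvBuildEq (q :: rest).length (q :: rest) le_rfl (by simp) 0]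
      simp
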